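-- pv_equiv track=rewrite | github.com/kunalchand/daily-leetcode-challenge | Mock Interview/kunal-interview/04 July 2024/Q2.py | manageStack
-- ===== SOURCE A (Python) =====
-- from typing import Deque, Dict, List, Optional, Set, Tuple, Union
--
-- def manageStack(string: str) -> List:
--     stack = []
--     for char in string:
--         if char == "#":
--             if stack:
--                 stack.pop()
--         else:
--             stack.append(char)
--     return stack
-- ===== SOURCE B (Python) =====
-- def manageStack(string: str):
--     skip = 0
--     out = []
--     for char in reversed(string):
--         if char == "#":
--             skip += 1
--         elif skip:
--             skip -= 1
--         else:
--             out.append(char)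
--     return out[::-1]
-- ===== Notes on version B (the rewrite author's own statement) =====
-- stated objective: alternative
-- what changed: Replaces the left-to-right stack with pop-on-backspace by a right-to-left scan carrying an integer skip counter, collecting survivors and reversing once at the end.
import Mathlib
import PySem

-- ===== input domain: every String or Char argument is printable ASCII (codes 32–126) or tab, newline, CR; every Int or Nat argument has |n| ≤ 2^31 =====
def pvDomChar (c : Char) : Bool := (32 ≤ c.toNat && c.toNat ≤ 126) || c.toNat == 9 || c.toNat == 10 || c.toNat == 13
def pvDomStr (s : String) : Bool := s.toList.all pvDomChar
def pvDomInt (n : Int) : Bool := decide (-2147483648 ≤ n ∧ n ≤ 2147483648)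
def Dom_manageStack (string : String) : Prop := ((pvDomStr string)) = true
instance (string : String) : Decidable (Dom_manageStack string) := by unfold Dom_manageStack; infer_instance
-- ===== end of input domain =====

-- B replaces A's left-to-right stack (pop on backspace) by a right-to-left scan with a skip counter; alternative decomposition, same cost.

-- ===== PORT A =====
-- A's loop body: push char, or pop on backspace (pop guarded by non-emptiness, as in Python)
def stepA (stack : List String) (char : Char) : List String :=
  if char = '#' then (if stack.isEmpty then stack else stack.dropLast)
  else stack ++ [char.toString]

def manageStack (string : String) : List String :=
  string.toList.foldl stepA []

-- ===== PORT B =====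
-- B's loop body over the reversed string: state = (skip counter, collected survivors in encounter order)
def stepB (st : Nat × List String) (char : Char) : Nat × List String :=
  if char = '#' then (st.1 + 1, st.2)
  else if 0 < st.1 then (st.1 - 1, st.2)
  else (st.1, st.2 ++ [char.toString])

def manageStack_alt (string : String) : List String :=
  (string.toList.reverse.foldl stepB (0, [])).2.reverse

-- ===== PRECONDITION & SPEC =====
def Spec_manageStack (string : String) (out : List String) : Prop := out = manageStack_alt string
instance (string : String) (out : List String) : Decidable (Spec_manageStack string out) := by unfold Spec_manageStack; infer_instance

-- ===== CLAIM (what is proved, stated in full; the proofs are below) =====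
def Claim_equal_manageStack : Prop := ∀ (string : String), Dom_manageStack string → Spec_manageStack string (manageStack string)

-- ===== LEMMAS AND PROOFS =====

-- k iterated dropLasts (the effect of k pending backspaces on a stack)
def pops : Nat → List String → List String
  | 0, s => s
  | k + 1, s => pops k s.dropLast

-- survivors of the reversed tail r under k pending backspaces, in encounter (right-to-left) order
def hEnc : List Char → Nat → List String
  | [], _ => []
  | c :: r, k =>
      if c = '#' then hEnc r (k + 1)
      else if 0 < k then hEnc r (k - 1)
      else c.toString :: hEnc r 0

theorem pops_nil (k : Nat) : pops k [] = [] := by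
  induction k with
  | zero => rfl
  | succ k ih => simpa [pops] using ih

theorem foldB_snd (l : List Char) : ∀ (k : Nat) (a : List String),
    (l.foldl stepB (k, a)).2 = a ++ hEnc l k := by
  induction l with
  | nil => simp [hEnc]
  | cons c r ih =>
      intro k a
      by_cases hc : c = '#'
      · simp [stepB, hEnc, hc, ih]
      · by_cases hk : 0 < k
        · simp [stepB, hEnc, hc, hk, ih]
        · have hk0 : k = 0 := Nat.eq_zero_of_not_pos hk
          subst hk0
          simp [stepB, hEnc, hc, ih]

theorem stepA_hash (S : List String) : stepA S '#' = S.dropLast := by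
  cases S <;> simp [stepA]

theorem hEnc_rev (r : List Char) : ∀ k : Nat,
    (hEnc r k).reverse = pops k (r.reverse.foldl stepA []) := by
  induction r with
  | nil => intro k; simp [hEnc, pops_nil]
  | cons c r ih =>
      intro k
      have hfold : (c :: r).reverse.foldl stepA ([] : List String)
          = stepA (r.reverse.foldl stepA []) c := by
        simp [List.foldl_append]
      by_cases hc : c = '#'
      · subst hc
        rw [hfold, stepA_hash]
        have : (hEnc ('#' :: r) k).reverse = pops (k + 1) (r.reverse.foldl stepA []) := by
          simp [hEnc, ih]
        simpa [pops] using this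
      · rcases Nat.eq_zero_or_pos k with hk | hk
        · subst hk
          rw [hfold]
          simp [hEnc, hc, stepA, ih, pops]
        · obtain ⟨j, rfl⟩ : ∃ j, k = j + 1 := ⟨k - 1, (Nat.succ_pred_eq_of_pos hk).symm⟩
          rw [hfold]
          simp [hEnc, hc, stepA, ih, pops]

-- ===== VERDICT (by name: the statement is the Claim_ definition above) =====
theorem manageStack_spec : Claim_equal_manageStack := by
  intro s _
  unfold Spec_manageStack manageStack manageStack_alt
  rw [foldB_snd]
  have := hEnc_rev s.toList.reverse 0
  simpa [pops] using this.symm
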